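-- pv_equiv track=rewrite | github.com/TannerGilbert/HackerRank-Solutions | ProblemSolving/Python/Strings/weighted_uniform_strings.py | weightedUniformStrings
-- ===== SOURCE A (Python) =====
-- def weightedUniformStrings(s, queries):
--     alphabet = 'abcdefghijklmnopqrstuvwxyz'
--     prev_c = ''
--     count = 1
--     weights = set()
--     for c in s:
--         if c == prev_c:
--             count += 1
--         else:
--             count = 1
--         prev_c = c
--         weights.add((alphabet.index(c) + 1) * count)
--     return list(map(lambda x: 'Yes' if x in weights else 'No', queries))
-- ===== SOURCE B (Python) =====
-- def weightedUniformStrings(s, queries):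
--     alphabet = 'abcdefghijklmnopqrstuvwxyz'
--     # phase 1: collect the uniform runs of s as (char, length) pairs
--     runs = []
--     for c in s:
--         if runs and runs[-1][0] == c:
--             runs[-1] = (c, runs[-1][1] + 1)
--         else:
--             runs.append((c, 1))
--     # phase 2: each run of value v and length L contributes the weights v*1 .. v*L
--     weights = set()
--     for ch, length in runs:
--         v = alphabet.index(ch) + 1
--         for k in range(1, length + 1):
--             weights.add(v * k)
--     return ['Yes' if q in weights else 'No' for q in queries]
-- ===== Notes on version B (the rewrite author's own statement) =====
-- stated objective: alternative
-- what changed: B replaces A's single pass with a per-character run counter by a two-phase pass: first collect the uniform runs as (char, length) pairs, then emit each run's prefix weights v*1..v*length into the set.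
import Mathlib
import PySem

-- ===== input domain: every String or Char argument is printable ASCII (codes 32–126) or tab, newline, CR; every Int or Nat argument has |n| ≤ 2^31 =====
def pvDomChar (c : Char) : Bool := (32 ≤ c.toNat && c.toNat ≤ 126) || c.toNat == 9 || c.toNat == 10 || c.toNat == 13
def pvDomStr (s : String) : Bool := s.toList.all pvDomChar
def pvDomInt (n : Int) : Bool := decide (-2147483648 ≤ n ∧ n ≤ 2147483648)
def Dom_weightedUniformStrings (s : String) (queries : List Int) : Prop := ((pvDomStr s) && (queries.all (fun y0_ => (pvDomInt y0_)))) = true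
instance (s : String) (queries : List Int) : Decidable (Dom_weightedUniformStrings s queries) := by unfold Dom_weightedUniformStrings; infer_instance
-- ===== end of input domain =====

-- B re-implements A as a two-phase pass (collect uniform runs, then emit each run's prefix weights)
-- instead of A's per-character run counter; objective: alternative decomposition, same cost.

-- ===== PORT A =====
def wusAlphabet : List Char := "abcdefghijklmnopqrstuvwxyz".toList

-- one iteration of A's for-loop; state = (prev_c, count, weights).
-- alphabet.index(c) raises ValueError (index? = none) for chars outside a-z: excluded by Pre_;
-- the getD default is never reached inside Pre_.
def wusStepA (st : Option Char × Int × PySem.Set Int) (c : Char) : Option Char × Int × PySem.Set Int :=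
  let count : Int := if some c = st.1 then st.2.1 + 1 else 1
  let idx : Int := ((PySem.List.index? wusAlphabet c).map (Int.ofNat)).getD (-1000)
  (some c, count, PySem.Set.add st.2.2 ((idx + 1) * count))

def weightedUniformStrings (s : String) (queries : List Int) : List String :=
  let st := s.toList.foldl wusStepA (none, 1, PySem.Set.empty)
  queries.map (fun x => if PySem.Set.contains st.2.2 x then "Yes" else "No")

-- ===== PORT B =====
-- phase 1 loop body of Source B: extend the last run or start a new one
def wusRunsStep (runs : List (Char × Int)) (c : Char) : List (Char × Int) :=
  match runs.getLast? with
  | some (p, n) => if p = c then runs.dropLast ++ [(c, n + 1)] else runs ++ [(c, 1)]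
  | none => runs ++ [(c, 1)]

-- phase 2 loop body of Source B: v = alphabet.index(ch) + 1 (ValueError = none, outside Pre_),
-- then add v*k for k in range(1, length+1)
def wusEmitStep (ws : PySem.Set Int) (r : Char × Int) : PySem.Set Int :=
  let v : Int := ((PySem.List.index? wusAlphabet r.1).map (Int.ofNat)).getD (-1000) + 1
  (PySem.List.pyRange 1 (r.2 + 1) 1).foldl (fun ws k => PySem.Set.add ws (v * k)) ws

def weightedUniformStrings_alt (s : String) (queries : List Int) : List String :=
  let runs := s.toList.foldl wusRunsStep []
  let weights := runs.foldl wusEmitStep PySem.Set.empty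
  queries.map (fun q => if PySem.Set.contains weights q then "Yes" else "No")

-- ===== PRECONDITION & SPEC =====
-- Pre_ excludes strings containing a character outside 'a'..'z', on which both Pythons'
-- alphabet.index raises ValueError; no input on which A returns is excluded.
def Pre_weightedUniformStrings (s : String) (queries : List Int) : Prop :=
  (s.toList.all (fun c => wusAlphabet.contains c)) = true
instance (s : String) (queries : List Int) : Decidable (Pre_weightedUniformStrings s queries) := by unfold Pre_weightedUniformStrings; infer_instance
def pvWitness_weightedUniformStrings : String × List Int := ("abb", [1, 2, 4, 0])

def Spec_weightedUniformStrings (s : String) (queries : List Int) (out : List String) : Prop := out = weightedUniformStrings_alt s queries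
instance (s : String) (queries : List Int) (out : List String) : Decidable (Spec_weightedUniformStrings s queries out) := by unfold Spec_weightedUniformStrings; infer_instance

-- ===== CLAIM (what is proved, stated in full; the proofs are below) =====
def Claim_equal_weightedUniformStrings : Prop := ∀ (s : String) (queries : List Int), Dom_weightedUniformStrings s queries → Pre_weightedUniformStrings s queries → Spec_weightedUniformStrings s queries (weightedUniformStrings s queries)

-- ===== LEMMAS AND PROOFS =====

-- the per-character weight value both loop bodies compute
def wusV (c : Char) : Int := ((PySem.List.index? wusAlphabet c).map (Int.ofNat)).getD (-1000) + 1

-- xs.foldl Set.add ws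
def wusAddAll (ws : PySem.Set Int) (xs : List Int) : PySem.Set Int := xs.foldl PySem.Set.add ws

-- the sequence of weights A inserts while continuing run (p, cnt)
def wusSeqA (p : Char) (cnt : Int) : List Char → List Int
  | [] => []
  | c :: t =>
    if p = c then wusV p * (cnt + 1) :: wusSeqA p (cnt + 1) t
    else wusV c * 1 :: wusSeqA c 1 t

-- the runs Source B's first loop produces after an open run (p, cnt)
def wusRunsR (p : Char) (cnt : Int) : List Char → List (Char × Int)
  | [] => [(p, cnt)]
  | c :: t => if p = c then wusRunsR c (cnt + 1) t else (p, cnt) :: wusRunsR c 1 t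

-- prefix weights of one run
def wusRm (p : Char) (cnt : Int) : List Int :=
  (PySem.List.pyRange 1 (cnt + 1) 1).map (fun k => wusV p * k)

theorem wusAddAll_append (ws : PySem.Set Int) (xs ys : List Int) :
    wusAddAll ws (xs ++ ys) = wusAddAll (wusAddAll ws xs) ys := by
  simp [wusAddAll, List.foldl_append]

-- A's fold characterised by wusSeqA
theorem wus_foldA (l : List Char) : ∀ (p : Char) (cnt : Int) (ws : PySem.Set Int),
    (l.foldl wusStepA (some p, cnt, ws)).2.2 = wusAddAll ws (wusSeqA p cnt l) := by
  induction l with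
  | nil => intro p cnt ws; simp [wusAddAll, wusSeqA]
  | cons c t ih =>
    intro p cnt ws
    by_cases hpc : p = c
    · subst hpc
      simp only [List.foldl_cons, wusStepA, wusSeqA, if_true]
      rw [ih p (cnt + 1) _]
      simp [wusAddAll, wusV]
    · simp only [List.foldl_cons, wusStepA, wusSeqA]
      rw [if_neg (by simp [Ne.symm hpc]), if_neg hpc]
      rw [ih c 1 _]
      simp [wusAddAll, wusV]

-- Source B's run-building fold characterised by wusRunsR
theorem wus_foldRuns (l : List Char) : ∀ (R : List (Char × Int)) (p : Char) (cnt : Int),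
    l.foldl wusRunsStep (R ++ [(p, cnt)]) = R ++ wusRunsR p cnt l := by
  induction l with
  | nil => intro R p cnt; simp [wusRunsR]
  | cons c t ih =>
    intro R p cnt
    simp only [List.foldl_cons, wusRunsStep, List.getLast?_append, List.getLast?_singleton,
      Option.some_or, wusRunsR]
    by_cases hpc : p = c
    · rw [if_pos hpc, if_pos hpc]
      have : (R ++ [(p, cnt)]).dropLast = R := by simp
      rw [this, ih R c (cnt + 1)]
    · rw [if_neg hpc, if_neg hpc]
      rw [show (R ++ [(p, cnt)]) ++ [(c, 1)] = (R ++ [(p, cnt)]) ++ [(c, (1:Int))] from rfl]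
      rw [ih (R ++ [(p, cnt)]) c 1]
      simp

-- Source B's emission fold = wusAddAll over the flattened prefix weights
theorem wus_foldEmit (runs : List (Char × Int)) : ∀ (ws : PySem.Set Int),
    runs.foldl wusEmitStep ws = wusAddAll ws (runs.flatMap (fun r => wusRm r.1 r.2)) := by
  induction runs with
  | nil => intro ws; simp [wusAddAll]
  | cons r t ih =>
    intro ws
    simp only [List.foldl_cons, List.flatMap_cons]
    rw [ih, wusAddAll_append]
    congr 1
    simp [wusEmitStep, wusRm, wusAddAll, wusV, List.foldl_map]

theorem wusRm_succ (p : Char) (cnt : Int) (h : 0 ≤ cnt) :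
    wusRm p (cnt + 1) = wusRm p cnt ++ [wusV p * (cnt + 1)] := by
  unfold wusRm
  rw [PySem.List.pyRange_one_succ_right (by omega)]
  simp

theorem wusRm_one (p : Char) : wusRm p 1 = [wusV p * 1] := by
  unfold wusRm
  rw [show (1 : Int) + 1 = 2 from rfl]
  rw [show PySem.List.pyRange 1 2 1 = [1] from by decide]
  simp

-- flattened runs = already-emitted prefix of the open run ++ A's remaining sequence
theorem wus_flat (l : List Char) : ∀ (p : Char) (cnt : Int), 0 ≤ cnt →
    (wusRunsR p cnt l).flatMap (fun r => wusRm r.1 r.2) = wusRm p cnt ++ wusSeqA p cnt l := by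
  induction l with
  | nil => intro p cnt _; simp [wusRunsR, wusSeqA]
  | cons c t ih =>
    intro p cnt hcnt
    by_cases hpc : p = c
    · subst hpc
      simp only [wusRunsR, wusSeqA, if_true]
      rw [ih p (cnt + 1) (by omega), wusRm_succ p cnt hcnt]
      simp
    · simp only [wusRunsR, wusSeqA, if_neg hpc]
      simp only [List.flatMap_cons]
      rw [ih c 1 (by omega), wusRm_one c]
      simp

-- ===== VERDICT (by name: the statement is the Claim_ definition above) =====
theorem weightedUniformStrings_spec : Claim_equal_weightedUniformStrings := by
  intro s queries _ _
  unfold Spec_weightedUniformStrings weightedUniformStrings weightedUniformStrings_alt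
  dsimp only
  cases hl : s.toList with
  | nil => simp
  | cons c t =>
    -- A's weights
    have hA : ((c :: t).foldl wusStepA (none, 1, PySem.Set.empty)).2.2
        = wusAddAll PySem.Set.empty (wusV c * 1 :: wusSeqA c 1 t) := by
      simp only [List.foldl_cons, wusStepA]
      rw [if_neg (by simp)]
      rw [wus_foldA t c 1 _]
      simp [wusAddAll, wusV]
    -- B's weights
    have hB : (((c :: t).foldl wusRunsStep []).foldl wusEmitStep PySem.Set.empty)
        = wusAddAll PySem.Set.empty (wusV c * 1 :: wusSeqA c 1 t) := by
      have h1 : (c :: t).foldl wusRunsStep [] = wusRunsR c 1 t := by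
        have := wus_foldRuns t ([] : List (Char × Int)) c 1
        simpa [wusRunsStep] using this
      rw [h1, wus_foldEmit, wus_flat t c 1 (by omega), wusRm_one c]
      simp
    simp only [hA, hB]
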